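-- pv_equiv track=rewrite | github.com/gsnoopy/codedex-daily-challenge | 2026/03/11 - Hitchhiker's Guide 🪐.py | minimum_components
-- ===== SOURCE A (Python) =====
-- from itertools import combinations
--
-- def minimum_components(components):
--   total = 0
--
--   for i in range(1, len(components) + 1):
--       for j in combinations(components, i):
--           total = sum(j)
--           if total == 42:
--             return len(j)
--
--   return -1
-- ===== SOURCE B (Python) =====
-- def minimum_components(components):
--     # Meet in the middle: min-cardinality subset-sum tables for each half,
--     # then combine pairs of half-sums that add up to 42.
--     def table(xs):
--         # sums achievable from subsets of xs -> minimal number of elements used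
--         t = {0: 0}
--         for x in xs:
--             for s, c in list(t.items()):
--                 u = s + x
--                 if c + 1 < t.get(u, c + 2):
--                     t[u] = c + 1
--         return t
--
--     half = len(components) // 2
--     left = table(components[:half])
--     right = table(components[half:])
--     best = None
--     for s, c in left.items():
--         c2 = right.get(42 - s)
--         if c2 is not None and (best is None or c + c2 < best):
--             best = c + c2
--     return -1 if best is None else best
-- ===== Notes on version B (the rewrite author's own statement) =====
-- stated objective: faster
-- what changed: Replaced brute-force enumeration of all combinations by size with a meet-in-the-middle dynamic programme: each half of the list gets a sum->minimal-cardinality table, and pairs of half-sums adding to 42 are combined.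
import Mathlib
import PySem

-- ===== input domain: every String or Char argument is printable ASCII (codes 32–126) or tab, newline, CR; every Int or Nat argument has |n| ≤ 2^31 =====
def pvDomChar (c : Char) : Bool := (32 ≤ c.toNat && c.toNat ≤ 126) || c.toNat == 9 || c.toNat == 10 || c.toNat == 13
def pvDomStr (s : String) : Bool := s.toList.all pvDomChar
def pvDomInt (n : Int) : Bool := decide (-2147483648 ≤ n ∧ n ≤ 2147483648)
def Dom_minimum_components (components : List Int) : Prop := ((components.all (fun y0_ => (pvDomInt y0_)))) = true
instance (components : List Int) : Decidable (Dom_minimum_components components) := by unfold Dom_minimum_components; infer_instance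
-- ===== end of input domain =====

-- B replaces A's brute-force scan of all combinations (by size) with a meet-in-the-middle
-- minimum-cardinality subset-sum table per half of the list; return values agree everywhere.

-- ===== PORT A =====
-- itertools.combinations(xs, k), in itertools' order
def pvCombos : Nat → List Int → List (List Int)
  | 0, _ => [[]]
  | _ + 1, [] => []
  | k + 1, x :: xs => (pvCombos k xs).map (x :: ·) ++ pvCombos (k + 1) xs

-- the inner 'for j in combinations(...)' loop: first j with sum(j) == 42 returns len(j)
def pvInnerA : List (List Int) → Option Int
  | [] => none
  | j :: rest => if j.sum = 42 then some (j.length : Int) else pvInnerA rest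

-- the outer 'for i in range(1, len(components) + 1)' loop
def pvLoopA (components : List Int) : List Int → Int
  | [] => -1
  | i :: rest =>
    match pvInnerA (pvCombos i.toNat components) with
    | some L => L
    | none => pvLoopA components rest

def minimum_components (components : List Int) : Int :=
  pvLoopA components (PySem.List.pyRange 1 ((components.length : Int) + 1) 1)

-- ===== PORT B =====
-- body of 'for s, c in list(t.items()):'
def pvTabUpd (x : Int) (b : PySem.Dict Int Int) (sc : Int × Int) : PySem.Dict Int Int :=
  if sc.2 + 1 < b.getD (sc.1 + x) (sc.2 + 2) then b.insert (sc.1 + x) (sc.2 + 1) else b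

-- one 'for x in xs' iteration: b.items is the list(t.items()) snapshot
def pvTabStep (b : PySem.Dict Int Int) (x : Int) : PySem.Dict Int Int :=
  b.items.foldl (pvTabUpd x) b

-- table(xs): sum -> minimal number of elements of a subset of xs with that sum
def pvTable (xs : List Int) : PySem.Dict Int Int :=
  xs.foldl pvTabStep (PySem.Dict.empty.insert 0 0)

-- body of 'for s, c in left.items():'
def pvBestUpd (right : PySem.Dict Int Int) (best : Option Int) (sc : Int × Int) : Option Int :=
  match right.get? (42 - sc.1) with
  | none => best
  | some c2 =>
    match best with
    | none => some (sc.2 + c2)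
    | some b => if sc.2 + c2 < b then some (sc.2 + c2) else best

def minimum_components_alt (components : List Int) : Int :=
  let half := PySem.Int.floordiv ((components.length : Int)) 2
  let left := pvTable (PySem.List.slice components none (some half))
  let right := pvTable (PySem.List.slice components (some half) none)
  match left.items.foldl (pvBestUpd right) none with
  | none => -1
  | some b => b

-- ===== PRECONDITION & SPEC =====
def Spec_minimum_components (components : List Int) (out : Int) : Prop := out = minimum_components_alt components
instance (components : List Int) (out : Int) : Decidable (Spec_minimum_components components out) := by unfold Spec_minimum_components; infer_instance

-- ===== CLAIM (what is proved, stated in full; the proofs are below) =====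
def Claim_equal_minimum_components : Prop := ∀ (components : List Int), Dom_minimum_components components → Spec_minimum_components components (minimum_components components)

-- ===== LEMMAS AND PROOFS =====

-- "some sublist of xs of length k sums to s"
def pvReach (xs : List Int) (s : Int) (k : Nat) : Prop :=
  ∃ l : List Int, l.Sublist xs ∧ l.length = k ∧ l.sum = s

-- option-minimum (min of the present values)
def pvMrg : Option Int → Option Int → Option Int
  | none, o => o
  | some a, none => some a
  | some a, some b => some (min a b)

-- "d is the min-cardinality subset-sum table of xs"
def pvIsTab (xs : List Int) (d : PySem.Dict Int Int) : Prop :=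
  d.keys.Nodup ∧
  (∀ s c, d.get? s = some c → ∃ k : Nat, c = (k : Int) ∧ pvReach xs s k) ∧
  (∀ s k, pvReach xs s k → ∃ c, d.get? s = some c ∧ c ≤ (k : Int))

-- candidate value contributed by one item of the left table
def pvCand (r : PySem.Dict Int Int) (p : Int × Int) : Option Int :=
  (r.get? (42 - p.1)).map (p.2 + ·)

lemma pvReach_nil (s : Int) (k : Nat) : pvReach [] s k ↔ (s = 0 ∧ k = 0) := by
  constructor
  · rintro ⟨l, hl, hk, hs⟩
    rw [List.sublist_nil] at hl; subst hl
    simp at hk hs; omega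
  · rintro ⟨hs, hk⟩; exact ⟨[], by simp [hs, hk]⟩

lemma pvReach_append_singleton (p : List Int) (x s : Int) (k : Nat) :
    pvReach (p ++ [x]) s k ↔ pvReach p s k ∨ ∃ k0, k = k0 + 1 ∧ pvReach p (s - x) k0 := by
  constructor
  · rintro ⟨l, hl, hk, hs⟩
    rw [List.sublist_append_iff] at hl
    obtain ⟨r1, r2, rfl, h1, h2⟩ := hl
    rcases List.sublist_singleton.mp h2 with rfl | rfl
    · exact Or.inl ⟨r1, by simpa using h1, by simpa using hk, by simpa using hs⟩
    · refine Or.inr ⟨r1.length, ?_, r1, h1, rfl, ?_⟩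
      · simp at hk; omega
      · simp at hs; omega
  · rintro (⟨l, hl, hk, hs⟩ | ⟨k0, rfl, l, hl, hk, hs⟩)
    · exact ⟨l, hl.trans (List.sublist_append_left _ _), hk, hs⟩
    · exact ⟨l ++ [x], List.Sublist.append hl (List.Sublist.refl _), by simp [hk], by simp [hs]⟩

lemma pvReach_concat {p q : List Int} {s1 s2 : Int} {k1 k2 : Nat}
    (h1 : pvReach p s1 k1) (h2 : pvReach q s2 k2) : pvReach (p ++ q) (s1 + s2) (k1 + k2) := by
  obtain ⟨l1, a1, b1, c1⟩ := h1
  obtain ⟨l2, a2, b2, c2⟩ := h2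
  exact ⟨l1 ++ l2, List.Sublist.append a1 a2, by simp [b1, b2], by simp [c1, c2]⟩

lemma pvReach_split {p q : List Int} {s : Int} {k : Nat} (h : pvReach (p ++ q) s k) :
    ∃ k1 k2, k = k1 + k2 ∧ ∃ s1, pvReach p s1 k1 ∧ pvReach q (s - s1) k2 := by
  obtain ⟨l, hl, hk, hs⟩ := h
  rw [List.sublist_append_iff] at hl
  obtain ⟨r1, r2, rfl, h1, h2⟩ := hl
  refine ⟨r1.length, r2.length, by simpa using hk.symm, r1.sum, ⟨r1, h1, rfl, rfl⟩, r2, h2, rfl, ?_⟩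
  simp at hs; omega

lemma pvReach_length_le {xs : List Int} {s : Int} {k : Nat} (h : pvReach xs s k) :
    k ≤ xs.length := by
  obtain ⟨l, hl, hk, -⟩ := h
  simpa [hk] using hl.length_le

lemma pvMrg_none_right (o : Option Int) : pvMrg o none = o := by cases o <;> rfl

lemma pvMrg_some_left_le (a : Int) (o : Option Int) :
    ∃ w, pvMrg (some a) o = some w ∧ w ≤ a := by
  cases o with
  | none => exact ⟨a, rfl, le_refl _⟩
  | some b => exact ⟨min a b, rfl, min_le_left _ _⟩

lemma pvMrg_some_right_le (o : Option Int) (a : Int) :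
    ∃ w, pvMrg o (some a) = some w ∧ w ≤ a := by
  cases o with
  | none => exact ⟨a, rfl, le_refl _⟩
  | some b => exact ⟨min b a, rfl, min_le_right _ _⟩

lemma pvMrg_eq_some {a b : Option Int} {w : Int} (h : pvMrg a b = some w) :
    a = some w ∨ b = some w := by
  cases a with
  | none => exact Or.inr h
  | some x =>
    cases b with
    | none => exact Or.inl h
    | some y =>
      simp only [pvMrg, Option.some.injEq] at h
      rcases min_cases x y with ⟨h1, -⟩ | ⟨h1, -⟩
      · exact Or.inl (by rw [← h, h1])
      · exact Or.inr (by rw [← h, h1])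

lemma pvBestUpd_eq_mrg (r : PySem.Dict Int Int) (best : Option Int) (p : Int × Int) :
    pvBestUpd r best p = pvMrg best (pvCand r p) := by
  unfold pvBestUpd pvCand
  cases h : r.get? (42 - p.1) with
  | none => simp [pvMrg_none_right]
  | some c2 =>
    cases best with
    | none => rfl
    | some b =>
      simp only [Option.map_some, pvMrg]
      split_ifs with hlt
      · rw [min_eq_right (le_of_lt hlt)]
      · rw [min_eq_left (by omega)]

lemma pvFold_mrg_none (r : PySem.Dict Int Int) (l : List (Int × Int))
    (h : ∀ p ∈ l, pvCand r p = none) :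
    l.foldl (pvBestUpd r) none = none := by
  induction l with
  | nil => rfl
  | cons p rest ih =>
    simp only [List.foldl_cons, pvBestUpd_eq_mrg, h p (by simp), pvMrg_none_right]
    exact ih fun q hq => h q (by simp [hq])

lemma pvFold_mrg_mono (r : PySem.Dict Int Int) (l : List (Int × Int)) :
    ∀ (b0 : Option Int) (v : Int), b0 = some v →
      ∃ w, l.foldl (pvBestUpd r) b0 = some w ∧ w ≤ v := by
  induction l with
  | nil => exact fun b0 v h => ⟨v, h, le_refl _⟩
  | cons p rest ih =>
    intro b0 v h
    subst h
    simp only [List.foldl_cons, pvBestUpd_eq_mrg]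
    obtain ⟨u, hu, hle⟩ := pvMrg_some_left_le v (pvCand r p)
    obtain ⟨w, hw, hwle⟩ := ih _ u hu
    exact ⟨w, hw, le_trans hwle hle⟩

lemma pvFold_mrg_le (r : PySem.Dict Int Int) (l : List (Int × Int)) (b0 : Option Int)
    {p : Int × Int} (hp : p ∈ l) {v : Int} (hv : pvCand r p = some v) :
    ∃ w, l.foldl (pvBestUpd r) b0 = some w ∧ w ≤ v := by
  induction l generalizing b0 with
  | nil => simp at hp
  | cons q rest ih =>
    simp only [List.foldl_cons, pvBestUpd_eq_mrg]
    rcases List.mem_cons.mp hp with rfl | hp'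
    · rw [hv]
      obtain ⟨u, hu, hle⟩ := pvMrg_some_right_le b0 v
      obtain ⟨w, hw, hwle⟩ := pvFold_mrg_mono r rest _ u hu
      exact ⟨w, hw, le_trans hwle hle⟩
    · exact ih _ hp'

lemma pvFold_mrg_mem (r : PySem.Dict Int Int) (l : List (Int × Int)) (b0 : Option Int)
    {w : Int} (h : l.foldl (pvBestUpd r) b0 = some w) :
    b0 = some w ∨ ∃ p ∈ l, pvCand r p = some w := by
  induction l generalizing b0 with
  | nil => exact Or.inl h
  | cons q rest ih =>
    simp only [List.foldl_cons, pvBestUpd_eq_mrg] at h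
    rcases ih _ h with hm | ⟨p, hp, hc⟩
    · rcases pvMrg_eq_some hm with h1 | h1
      · exact Or.inl h1
      · exact Or.inr ⟨q, by simp, h1⟩
    · exact Or.inr ⟨p, by simp [hp], hc⟩


lemma pvNodup_tabFold (x : Int) (l : List (Int × Int)) :
    ∀ (b : PySem.Dict Int Int), b.keys.Nodup → (l.foldl (pvTabUpd x) b).keys.Nodup := by
  induction l with
  | nil => exact fun b h => h
  | cons p rest ih =>
    intro b h
    simp only [List.foldl_cons]
    apply ih
    unfold pvTabUpd
    split_ifs
    · exact PySem.Dict.nodup_keys_insert _ _ _ h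
    · exact h

lemma pvNodup_tabStep (x : Int) (b : PySem.Dict Int Int) (h : b.keys.Nodup) :
    (pvTabStep b x).keys.Nodup := pvNodup_tabFold x b.items b h

lemma pvTabFold_get? (x : Int) (b : PySem.Dict Int Int) (hnd : b.keys.Nodup) :
    ∀ (todo done : List (Int × Int)) (b' : PySem.Dict Int Int),
      b.items = done ++ todo →
      (∀ t, b'.get? t = if (t - x) ∈ done.map Prod.fst
          then pvMrg (b.get? t) ((b.get? (t - x)).map (· + 1)) else b.get? t) →
      ∀ t, (todo.foldl (pvTabUpd x) b').get? t
        = pvMrg (b.get? t) ((b.get? (t - x)).map (· + 1)) := by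
  intro todo
  induction todo with
  | nil =>
    intro done b' hitems hinv t
    simp only [List.foldl_nil]
    rw [hinv t]
    split_ifs with hmem
    · rfl
    · have hkeys : (t - x) ∉ b.keys := by
        have : b.keys = done.map Prod.fst := by
          simp only [PySem.Dict.keys, hitems, List.append_nil]
        rw [this]; exact hmem
      have : b.get? (t - x) = none := (PySem.Dict.get?_eq_none_iff_not_mem_keys b (t - x)).mpr hkeys
      rw [this, Option.map_none, pvMrg_none_right]
  | cons sc rest ih =>
    intro done b' hitems hinv t
    obtain ⟨s, c⟩ := sc
    have hmemitems : (s, c) ∈ b.items := by rw [hitems]; simp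
    have hbs : b.get? s = some c := PySem.Dict.get?_of_mem_items b hmemitems hnd
    have hsnot : s ∉ done.map Prod.fst := by
      have h1 : b.keys = done.map Prod.fst ++ s :: rest.map Prod.fst := by
        simp only [PySem.Dict.keys, hitems, List.map_append, List.map_cons]
      rw [h1] at hnd
      have := List.disjoint_of_nodup_append hnd
      intro hc
      exact (this hc) (by simp)
    have hbu : b'.get? (s + x) = b.get? (s + x) := by
      rw [hinv (s + x)]
      have : s + x - x = s := by ring
      rw [this, if_neg hsnot]
    simp only [List.foldl_cons]
    apply ih (done ++ [(s, c)]) _ (by rw [hitems]; simp)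
    intro t
    by_cases ht : t = s + x
    · subst ht
      have harg : s + x - x = s := by ring
      have hcnd : (s + x - x) ∈ (done ++ [(s, c)]).map Prod.fst := by
        rw [harg]; simp
      rw [if_pos hcnd, harg, hbs]
      unfold pvTabUpd
      simp only
      rw [PySem.Dict.getD_eq_get?_getD, hbu]
      cases hb : b.get? (s + x) with
      | none =>
        simp only [Option.getD_none]
        rw [if_pos (by omega)]
        simp only [pvMrg, Option.map_some]
        exact PySem.Dict.get?_insert_self _ _ _
      | some v =>
        simp only [Option.getD_some, Option.map_some, pvMrg]
        split_ifs with hlt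
        · rw [PySem.Dict.get?_insert_self]
          rw [min_eq_right (le_of_lt hlt)]
        · rw [hbu, hb, min_eq_left (by omega)]
    · have hne : t - x ≠ s := by omega
      have hcnd : ((t - x) ∈ (done ++ [(s, c)]).map Prod.fst)
          ↔ ((t - x) ∈ done.map Prod.fst) := by
        simp [hne]
      simp only [hcnd]
      have hupd : (pvTabUpd x b' (s, c)).get? t = b'.get? t := by
        unfold pvTabUpd
        simp only
        split_ifs
        · exact PySem.Dict.get?_insert_of_ne _ _ ht
        · rfl
      rw [hupd, hinv t]

lemma pvTabStep_get? (x : Int) (b : PySem.Dict Int Int) (hnd : b.keys.Nodup) (t : Int) :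
    (pvTabStep b x).get? t = pvMrg (b.get? t) ((b.get? (t - x)).map (· + 1)) := by
  apply pvTabFold_get? x b hnd b.items [] b rfl
  intro t'
  simp

lemma pvIsTab_base : pvIsTab [] (PySem.Dict.empty.insert 0 0) := by
  refine ⟨PySem.Dict.nodup_keys_insert _ _ _ PySem.Dict.nodup_keys_empty, ?_, ?_⟩
  · intro s c h
    rw [PySem.Dict.get?_insert] at h
    split_ifs at h with hs
    · subst hs
      refine ⟨0, by simpa using h.symm, [], by simp⟩
    · rw [PySem.Dict.get?_empty] at h; exact absurd h (by simp)
  · intro s k h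
    obtain ⟨hs, hk⟩ := (pvReach_nil s k).mp h
    subst hs
    exact ⟨0, PySem.Dict.get?_insert_self _ _ _, by omega⟩

lemma pvIsTab_step {p : List Int} {b : PySem.Dict Int Int} (h : pvIsTab p b) (x : Int) :
    pvIsTab (p ++ [x]) (pvTabStep b x) := by
  obtain ⟨hnd, hsound, hcompl⟩ := h
  refine ⟨pvNodup_tabStep x b hnd, ?_, ?_⟩
  · intro s c hc
    rw [pvTabStep_get? x b hnd] at hc
    cases h1 : b.get? s with
    | none =>
      rw [h1] at hc
      cases h2 : b.get? (s - x) with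
      | none => rw [h2] at hc; simp [pvMrg] at hc
      | some c0 =>
        rw [h2] at hc
        simp only [Option.map_some, pvMrg, Option.some.injEq] at hc
        obtain ⟨k0, hk0, hr⟩ := hsound _ _ h2
        refine ⟨k0 + 1, by omega, ?_⟩
        rw [pvReach_append_singleton]
        exact Or.inr ⟨k0, rfl, hr⟩
    | some c1 =>
      rw [h1] at hc
      cases h2 : b.get? (s - x) with
      | none =>
        rw [h2] at hc
        simp only [Option.map_none, pvMrg, Option.some.injEq] at hc
        obtain ⟨k1, hk1, hr⟩ := hsound _ _ h1
        exact ⟨k1, by omega, (pvReach_append_singleton p x s k1).mpr (Or.inl hr)⟩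
      | some c0 =>
        rw [h2] at hc
        simp only [Option.map_some, pvMrg, Option.some.injEq] at hc
        obtain ⟨k1, hk1, hr1⟩ := hsound _ _ h1
        obtain ⟨k0, hk0, hr0⟩ := hsound _ _ h2
        by_cases hle : c1 ≤ c0 + 1
        · refine ⟨k1, by rw [← hc]; omega, (pvReach_append_singleton p x s k1).mpr (Or.inl hr1)⟩
        · refine ⟨k0 + 1, by rw [← hc]; push_cast; omega, (pvReach_append_singleton p x s (k0 + 1)).mpr
            (Or.inr ⟨k0, rfl, hr0⟩)⟩
  · intro s k hr
    rw [pvReach_append_singleton] at hr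
    rw [pvTabStep_get? x b hnd] -- not a rewrite of hypothesis; goal mentions get?
    rcases hr with hr | ⟨k0, rfl, hr⟩
    · obtain ⟨c, hc, hle⟩ := hcompl _ _ hr
      rw [hc]
      obtain ⟨w, hw, hwle⟩ := pvMrg_some_left_le c ((b.get? (s - x)).map (· + 1))
      exact ⟨w, hw, le_trans hwle hle⟩
    · obtain ⟨c0, hc0, hle⟩ := hcompl _ _ hr
      rw [hc0]
      simp only [Option.map_some]
      obtain ⟨w, hw, hwle⟩ := pvMrg_some_right_le (b.get? s) (c0 + 1)
      refine ⟨w, hw, by push_cast; omega⟩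

lemma pvIsTab_fold (xs : List Int) :
    ∀ (p : List Int) (b : PySem.Dict Int Int), pvIsTab p b →
      pvIsTab (p ++ xs) (xs.foldl pvTabStep b) := by
  induction xs with
  | nil => intro p b h; simpa using h
  | cons x rest ih =>
    intro p b h
    have := ih (p ++ [x]) (pvTabStep b x) (pvIsTab_step h x)
    simpa using this

lemma pvIsTab_table (xs : List Int) : pvIsTab xs (pvTable xs) := by
  have := pvIsTab_fold xs [] _ pvIsTab_base
  simpa [pvTable] using this

lemma pvMem_combos {k : Nat} {xs l : List Int} :
    l ∈ pvCombos k xs ↔ l.Sublist xs ∧ l.length = k := by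
  induction xs generalizing k l with
  | nil =>
    cases k with
    | zero => simp [pvCombos, List.sublist_nil]
    | succ k =>
      simp only [pvCombos, List.not_mem_nil, false_iff, List.sublist_nil]
      rintro ⟨rfl, h⟩; simp at h
  | cons x xs ih =>
    cases k with
    | zero =>
      simp only [pvCombos, List.mem_singleton, List.length_eq_zero_iff]
      constructor
      · rintro rfl; exact ⟨List.nil_sublist _, rfl⟩
      · rintro ⟨-, h⟩; exact h
    | succ k =>
      simp only [pvCombos, List.mem_append, List.mem_map, ih]
      constructor
      · rintro (⟨a, ⟨ha, rfl⟩, rfl⟩ | ⟨h1, h2⟩)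
        · exact ⟨List.cons_sublist_cons.mpr ha, by simp⟩
        · exact ⟨h1.trans (List.sublist_cons_self _ _), h2⟩
      · rintro ⟨hs, hlen⟩
        rcases List.sublist_cons_iff.mp hs with h | ⟨r, rfl, hr⟩
        · exact Or.inr ⟨h, hlen⟩
        · exact Or.inl ⟨r, ⟨hr, by simpa using hlen⟩, rfl⟩

lemma pvInnerA_none {L : List (List Int)} (h : ∀ l ∈ L, l.sum ≠ 42) : pvInnerA L = none := by
  induction L with
  | nil => rfl
  | cons j rest ih =>
    simp only [pvInnerA]
    rw [if_neg (h j (by simp))]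
    exact ih fun l hl => h l (by simp [hl])

lemma pvInnerA_some {L : List (List Int)} {k : Nat} (hlen : ∀ l ∈ L, l.length = k)
    (h : ∃ l ∈ L, l.sum = 42) : pvInnerA L = some (k : Int) := by
  induction L with
  | nil => simp at h
  | cons j rest ih =>
    simp only [pvInnerA]
    by_cases hj : j.sum = 42
    · rw [if_pos hj, hlen j (by simp)]
    · rw [if_neg hj]
      obtain ⟨l, hl, hsum⟩ := h
      rcases hl with _ | hl
      · exact absurd hsum hj
      · exact ih (fun l hl => hlen l (by simp [hl])) ⟨l, by assumption, hsum⟩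

lemma pvLoopA_none {xs : List Int} (h : ∀ k, ¬ pvReach xs 42 k) (a b : Int) :
    pvLoopA xs (PySem.List.pyRange a b 1) = -1 := by
  by_cases hab : b ≤ a
  · rw [PySem.List.pyRange_one_eq_nil hab]; rfl
  · push Not at hab
    rw [PySem.List.pyRange_one_cons hab]
    have : pvInnerA (pvCombos a.toNat xs) = none := by
      apply pvInnerA_none
      intro l hl hsum
      rw [pvMem_combos] at hl
      exact h l.length ⟨l, hl.1, rfl, hsum⟩
    simp only [pvLoopA, this]
    exact pvLoopA_none h (a + 1) b
termination_by (b - a).toNat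
decreasing_by omega

lemma pvLoopA_found {xs : List Int} {m : Nat} (hm : pvReach xs 42 m)
    (hmin : ∀ j, pvReach xs 42 j → m ≤ j) :
    ∀ (a b : Int), 0 ≤ a → a ≤ (m : Int) → (m : Int) < b →
      pvLoopA xs (PySem.List.pyRange a b 1) = (m : Int) := by
  intro a b ha ham hmb
  have hab : a < b := lt_of_le_of_lt ham hmb
  rw [PySem.List.pyRange_one_cons hab]
  by_cases heq : a = (m : Int)
  · have hA : a.toNat = m := by omega
    have hI : pvInnerA (pvCombos a.toNat xs) = some ((m : Nat) : Int) := by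
      rw [hA]
      apply pvInnerA_some
      · intro l hl; exact (pvMem_combos.mp hl).2
      · obtain ⟨l, hl, hlen, hsum⟩ := hm
        exact ⟨l, pvMem_combos.mpr ⟨hl, hlen⟩, hsum⟩
    simp only [pvLoopA, hI]
  · have : pvInnerA (pvCombos a.toNat xs) = none := by
      apply pvInnerA_none
      intro l hl hsum
      rw [pvMem_combos] at hl
      have := hmin l.length ⟨l, hl.1, rfl, hsum⟩
      omega
    simp only [pvLoopA, this]
    exact pvLoopA_found hm hmin (a + 1) b (by omega) (by omega) hmb
termination_by a b => (b - a).toNat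
decreasing_by omega

lemma pvSplit_eq (components : List Int) :
    PySem.List.slice components none (some (PySem.Int.floordiv ((components.length : Int)) 2)) ++
      PySem.List.slice components (some (PySem.Int.floordiv ((components.length : Int)) 2)) none
    = components := by
  have hfd : PySem.Int.floordiv ((components.length : Int)) 2
      = ((components.length / 2 : Nat) : Int) := by
    exact_mod_cast PySem.Int.floordiv_natCast components.length 2
  rw [hfd, PySem.List.slice_to_natCast, PySem.List.slice_from_natCast, List.take_append_drop]

-- any key/value pair of left combined with a right lookup is a genuine reach of 42
lemma pvCand_reach {tl tr : List Int} {left right : PySem.Dict Int Int}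
    (hL : pvIsTab tl left) (hR : pvIsTab tr right) {p : Int × Int} (hp : p ∈ left.items)
    {v : Int} (hv : pvCand right p = some v) :
    ∃ k : Nat, v = (k : Int) ∧ pvReach (tl ++ tr) 42 k := by
  obtain ⟨hndL, hsoundL, -⟩ := hL
  obtain ⟨hndR, hsoundR, -⟩ := hR
  obtain ⟨p1, p2⟩ := p
  have hgl : left.get? p1 = some p2 := PySem.Dict.get?_of_mem_items left hp hndL
  simp only [pvCand, Option.map_eq_some_iff] at hv
  obtain ⟨c2, hgr, rfl⟩ := hv
  obtain ⟨k1, hk1, hr1⟩ := hsoundL _ _ hgl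
  obtain ⟨k2, hk2, hr2⟩ := hsoundR _ _ hgr
  refine ⟨k1 + k2, by push_cast; omega, ?_⟩
  have := pvReach_concat hr1 hr2
  have harg : p1 + (42 - p1) = 42 := by ring
  rwa [harg] at this

lemma pvAlt_none {components : List Int} (h : ∀ k, ¬ pvReach components 42 k) :
    minimum_components_alt components = -1 := by
  unfold minimum_components_alt
  simp only
  rw [pvFold_mrg_none]
  intro p hp
  cases hv : pvCand (pvTable (PySem.List.slice components
      (some (PySem.Int.floordiv ((components.length : Int)) 2)) none)) p with
  | none => rfl
  | some v =>
    exfalso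
    obtain ⟨k, -, hr⟩ := pvCand_reach (pvIsTab_table _) (pvIsTab_table _) hp hv
    rw [pvSplit_eq] at hr
    exact h k hr

lemma pvAlt_found {components : List Int} {m : Nat} (hm : pvReach components 42 m)
    (hmin : ∀ j, pvReach components 42 j → m ≤ j) :
    minimum_components_alt components = (m : Int) := by
  unfold minimum_components_alt
  simp only
  set half := PySem.Int.floordiv ((components.length : Int)) 2 with hhalf
  set tl := PySem.List.slice components none (some half) with htl
  set tr := PySem.List.slice components (some half) none with htr
  have hsplit : tl ++ tr = components := pvSplit_eq components
  have hL := pvIsTab_table tl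
  have hR := pvIsTab_table tr
  -- a candidate of value ≤ m exists
  rw [← hsplit] at hm
  obtain ⟨k1, k2, hk, s1, hr1, hr2⟩ := pvReach_split hm
  obtain ⟨c, hgc, hcle⟩ := hL.2.2 _ _ hr1
  obtain ⟨c2, hgc2, hc2le⟩ := hR.2.2 _ _ hr2
  have hp : (s1, c) ∈ (pvTable tl).items := PySem.Dict.mem_items_of_get?_eq_some _ hgc
  have hcand : pvCand (pvTable tr) (s1, c) = some (c + c2) := by
    simp only [pvCand]
    rw [hgc2]
    rfl
  obtain ⟨w, hw, hwle⟩ := pvFold_mrg_le (pvTable tr) (pvTable tl).items none hp hcand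
  rw [hw]
  -- and every candidate is at least m
  rcases pvFold_mrg_mem _ _ _ hw with hnone | ⟨p, hpmem, hpc⟩
  · exact absurd hnone (by simp)
  · obtain ⟨k, hkw, hkr⟩ := pvCand_reach hL hR hpmem hpc
    rw [hsplit] at hkr
    have hge := hmin k hkr
    have : ((m : Nat) : Int) ≤ w := by omega
    have hub : w ≤ (m : Int) := by
      have : c + c2 ≤ (k1 : Int) + (k2 : Int) := by omega
      omega
    show w = (m : Int)
    omega

-- ===== VERDICT (by name: the statement is the Claim_ definition above) =====
theorem minimum_components_spec : Claim_equal_minimum_components := by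
  intro components _
  unfold Spec_minimum_components
  by_cases hex : ∃ k : Nat, pvReach components 42 k
  · haveI : DecidablePred (fun k => pvReach components 42 k) := Classical.decPred _
    set m := Nat.find hex with hmdef
    have hm : pvReach components 42 m := Nat.find_spec hex
    have hmin : ∀ j, pvReach components 42 j → m ≤ j := fun j hj => Nat.find_le hj
    have hm1 : 1 ≤ m := by
      rcases Nat.eq_zero_or_pos m with h0 | h1
      · exfalso
        rw [h0] at hm
        obtain ⟨l, -, hlen, hsum⟩ := hm
        rw [List.eq_nil_iff_length_eq_zero.mpr hlen] at hsum
        simp at hsum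
      · exact h1
    have hmn : m ≤ components.length := pvReach_length_le hm
    rw [pvAlt_found hm hmin]
    unfold minimum_components
    exact pvLoopA_found hm hmin 1 ((components.length : Int) + 1)
      (by omega) (by omega) (by omega)
  · push Not at hex
    rw [pvAlt_none hex]
    unfold minimum_components
    exact pvLoopA_none hex 1 ((components.length : Int) + 1)
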